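-- pv_equiv track=rewrite | github.com/Leapense/problems | 21507번: POBEDA-2014/POBEDA-2014.py | max_square_length
-- ===== SOURCE A (Python) =====
-- def max_square_length(a1, a2, a3, a4):
--     def can_form_square(k):
--         # Required number of triangles to form a k x k square
--         required_triangles = 2 * k * k
--         # We need exactly half the triangles of two orientations combined
--         half_required = k * k
--
--         # Check if we can form k*k triangles of each of the opposite orientations
--         return min(a1, a4) + min(a2, a3) >= half_required
--
--     # Binary search for the maximum side length of the square
--     low, high = 0, int(1e9)  # Setting a practical upper bound
--
--     while low < high:
--         mid = (low + high + 1) // 2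
--         if can_form_square(mid):
--             low = mid
--         else:
--             high = mid - 1
--
--     return low
-- ===== SOURCE B (Python) =====
-- import math
--
-- def max_square_length(a1, a2, a3, a4):
--     s = min(a1, a4) + min(a2, a3)
--     return min(math.isqrt(max(0, s)), 10**9)
-- ===== Notes on version B (the rewrite author's own statement) =====
-- stated objective: simpler
-- what changed: Replaces the 1e9-bounded binary search over the feasibility predicate by a direct closed form: clamp the sum min(a1,a4)+min(a2,a3) at 0, take its integer square root, and cap at 10**9.
import Mathlib
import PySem

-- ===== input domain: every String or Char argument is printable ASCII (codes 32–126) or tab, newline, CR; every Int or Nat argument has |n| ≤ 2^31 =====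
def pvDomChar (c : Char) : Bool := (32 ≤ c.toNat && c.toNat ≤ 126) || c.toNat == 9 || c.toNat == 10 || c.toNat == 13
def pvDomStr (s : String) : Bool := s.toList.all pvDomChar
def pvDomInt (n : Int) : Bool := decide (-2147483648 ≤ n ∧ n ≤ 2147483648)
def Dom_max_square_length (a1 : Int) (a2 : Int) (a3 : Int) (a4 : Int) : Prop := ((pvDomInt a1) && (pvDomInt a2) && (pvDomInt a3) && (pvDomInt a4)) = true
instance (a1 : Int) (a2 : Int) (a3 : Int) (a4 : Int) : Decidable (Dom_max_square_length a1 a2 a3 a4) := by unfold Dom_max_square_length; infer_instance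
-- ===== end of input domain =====

-- B replaces A's 1e9-bounded binary search by a direct closed form (clamped integer square root); objective: simpler.

-- ===== PORT A =====
-- inner predicate can_form_square(k)
def pvCanFormSquare (a1 : Int) (a2 : Int) (a3 : Int) (a4 : Int) (k : Int) : Bool :=
  let _required_triangles := 2 * k * k
  let half_required := k * k
  min a1 a4 + min a2 a3 ≥ half_required

-- the while-loop of A; the Nat fuel only guards totality (the interval length
-- shrinks every iteration, so fuel = (high-low).toNat never runs out)
def pvMslLoop (a1 : Int) (a2 : Int) (a3 : Int) (a4 : Int) (fuel : Nat) (low : Int) (high : Int) : Int :=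
  match fuel with
  | 0 => low
  | fuel + 1 =>
    if low < high then
      let mid := PySem.Int.floordiv (low + high + 1) 2
      if pvCanFormSquare a1 a2 a3 a4 mid then
        pvMslLoop a1 a2 a3 a4 fuel mid high
      else
        pvMslLoop a1 a2 a3 a4 fuel low (mid - 1)
    else low

def max_square_length (a1 : Int) (a2 : Int) (a3 : Int) (a4 : Int) : Int :=
  pvMslLoop a1 a2 a3 a4 1000000000 0 1000000000

-- ===== PORT B =====
def max_square_length_alt (a1 : Int) (a2 : Int) (a3 : Int) (a4 : Int) : Int :=
  let s := min a1 a4 + min a2 a3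
  min ((Nat.sqrt (max 0 s).toNat : Int)) (10 ^ 9)

-- ===== PRECONDITION & SPEC =====
def Spec_max_square_length (a1 : Int) (a2 : Int) (a3 : Int) (a4 : Int) (out : Int) : Prop := out = max_square_length_alt a1 a2 a3 a4
instance (a1 : Int) (a2 : Int) (a3 : Int) (a4 : Int) (out : Int) : Decidable (Spec_max_square_length a1 a2 a3 a4 out) := by unfold Spec_max_square_length; infer_instance

-- ===== CLAIM (what is proved, stated in full; the proofs are below) =====
def Claim_equal_max_square_length : Prop := ∀ (a1 : Int) (a2 : Int) (a3 : Int) (a4 : Int), Dom_max_square_length a1 a2 a3 a4 → Spec_max_square_length a1 a2 a3 a4 (max_square_length a1 a2 a3 a4)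

-- ===== LEMMAS AND PROOFS =====

-- Invariant: if low ≤ t ≤ high, 0 ≤ low, and for every positive k the predicate
-- holds exactly when k ≤ t, then the binary search returns t.
theorem pvMslLoop_eq (a1 a2 a3 a4 : Int) (t : Int)
    (hk : ∀ k : Int, 0 < k → (pvCanFormSquare a1 a2 a3 a4 k = true ↔ k ≤ t)) :
    ∀ (fuel : Nat) (low high : Int), (high - low).toNat ≤ fuel → 0 ≤ low → low ≤ t → t ≤ high →
      pvMslLoop a1 a2 a3 a4 fuel low high = t := by
  intro fuel
  induction fuel with
  | zero =>
    intro low high hf h0 hlt hth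
    simp only [pvMslLoop]
    omega
  | succ fuel ih =>
    intro low high hf h0 hlt hth
    rw [pvMslLoop]
    by_cases h : low < high
    · simp only [h, if_true]
      have e : PySem.Int.floordiv (low + high + 1) 2 = (low + high + 1) / 2 :=
        PySem.Int.floordiv_eq_ediv_of_pos (by omega)
      have hmid : low < PySem.Int.floordiv (low + high + 1) 2 ∧
          PySem.Int.floordiv (low + high + 1) 2 ≤ high := by
        constructor <;> (rw [e]; omega)
      by_cases hcan : pvCanFormSquare a1 a2 a3 a4 (PySem.Int.floordiv (low + high + 1) 2) = true
      · rw [if_pos hcan]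
        have hmt := (hk _ (by omega)).1 hcan
        exact ih _ _ (by omega) (by omega) hmt hth
      · rw [if_neg hcan]
        have htm : t < PySem.Int.floordiv (low + high + 1) 2 := by
          by_contra hc
          exact hcan ((hk _ (by omega)).2 (by omega))
        exact ih _ _ (by omega) h0 hlt (by omega)
    · simp only [h, if_false]
      omega

theorem max_square_length_spec : Claim_equal_max_square_length := by
  intro a1 a2 a3 a4 hdom
  unfold Spec_max_square_length max_square_length max_square_length_alt
  simp only [Dom_max_square_length, pvDomInt, Bool.and_eq_true, decide_eq_true_eq] at hdom
  set s : Int := min a1 a4 + min a2 a3 with hs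
  have hsle : s ≤ 4294967296 := by
    have := min_le_left a1 a4
    have := min_le_left a2 a3
    omega
  -- the clamped square root
  set r : Nat := Nat.sqrt (max 0 s).toNat with hr
  have hrle : r ≤ 65536 := by
    have h1 : (max 0 s).toNat ≤ 65536 * 65536 := by omega
    have := Nat.sqrt_le_sqrt h1
    have h2 : Nat.sqrt (65536 * 65536) = 65536 := Nat.sqrt_eq' 65536
    omega
  have hmin : min ((r : Int)) (10 ^ 9) = (r : Int) := by
    rw [min_eq_left]; omega
  rw [hmin]
  apply pvMslLoop_eq
  · intro k hkpos
    simp only [pvCanFormSquare, ge_iff_le, decide_eq_true_eq, ← hs]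
    constructor
    · intro hks
      -- k*k ≤ s, so s ≥ 1 > 0, and k.toNat ≤ sqrt
      have hkk : (1:Int) ≤ k * k := by nlinarith
      have hball : (k.toNat) * (k.toNat) ≤ (max 0 s).toNat := by
        have : (k:Int) * k ≤ max 0 s := by omega
        have hc : ((k.toNat : Int)) = k := Int.toNat_of_nonneg (by omega)
        zify; rw [hc]; omega
      have := Nat.le_sqrt.2 hball
      omega
    · intro hkr
      have hc : ((k.toNat : Int)) = k := Int.toNat_of_nonneg (by omega)
      have hkn : k.toNat ≤ r := by omega
      rw [hr] at hkn
      have hsq : k.toNat * k.toNat ≤ (max 0 s).toNat := Nat.le_sqrt.1 hkn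
      have h2 : (k:Int) * k ≤ ((max 0 s).toNat : Int) := by
        zify at hsq; rw [hc] at hsq; exact hsq
      have h3 : ((max 0 s).toNat : Int) = max 0 s := Int.toNat_of_nonneg (le_max_left _ _)
      have hkk : (1:Int) ≤ k * k := by nlinarith
      omega
  · omega
  · omega
  · positivity
  · omega
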